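-- pv_equiv track=rewrite | github.com/lychristy/Algorithm | 2 Difference In Sorted Array.py | twoDiff
-- ===== SOURCE A (Python) =====
-- def twoDiff(array, target):
--   """
--   input: int[] array, int target
--   return: int[]
--   """
--   # write your solution here
--   if abs(array[len(array) - 1] - array[0]) < abs(target):
--     return []
--
--   res = []
--   for i in range(len(array) - 1):
--     for j in range(i + 1, len(array)):
--       if array[j] - array[i] == target:
--         return [i, j]
--       elif array[j] - array[i] == -target:
--         res = [j, i]
--
--   return res
-- ===== SOURCE B (Python) =====
-- def twoDiff(array, target):
--   """
--   input: int[] array, int target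
--   return: int[]
--   """
--   n = len(array)
--   if abs(array[n - 1] - array[0]) < abs(target):
--     return []
--   # last occurrence index of each value
--   last = {}
--   for p in range(n):
--     last[array[p]] = p
--   # first (lexicographic) pair with array[j] - array[i] == target
--   for i in range(n - 1):
--     v = array[i] + target
--     if last.get(v, -1) > i:
--       j = i + 1
--       while array[j] != v:
--         j += 1
--       return [i, j]
--   # otherwise: last (lexicographic) pair with array[j] - array[i] == -target
--   for i in range(n - 2, -1, -1):
--     j = last.get(array[i] - target, -1)
--     if j > i:
--       return [j, i]
--   return []
-- ===== Notes on version B (the rewrite author's own statement) =====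
-- stated objective: faster
-- what changed: Replaced the quadratic nested scan over all index pairs by a single last-occurrence dictionary plus two linear passes: a forward pass finding the first i whose partner value occurs later (then a single forward scan for the minimal j), and a backward pass using the stored maximal j for the -target case.
import Mathlib
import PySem

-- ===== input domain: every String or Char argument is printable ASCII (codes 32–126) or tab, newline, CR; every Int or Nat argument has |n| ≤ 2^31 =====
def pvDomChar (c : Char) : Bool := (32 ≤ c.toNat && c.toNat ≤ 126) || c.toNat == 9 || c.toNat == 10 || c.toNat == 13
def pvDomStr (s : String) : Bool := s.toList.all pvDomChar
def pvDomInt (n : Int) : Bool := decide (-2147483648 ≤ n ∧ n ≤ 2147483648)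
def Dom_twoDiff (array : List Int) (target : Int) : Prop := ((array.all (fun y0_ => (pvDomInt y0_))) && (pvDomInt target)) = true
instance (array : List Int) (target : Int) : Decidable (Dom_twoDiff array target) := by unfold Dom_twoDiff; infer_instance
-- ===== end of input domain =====

-- B replaces A's quadratic nested pair scan by a last-occurrence dictionary and two
-- linear passes (objective: faster, asymptotic O(n^2) -> O(n)).

-- ===== PORT A =====
-- inner loop 'for j in range(i+1, len(array))': early return as 'some r', else updated res
def pvAInner (a : List Int) (t : Int) (i : Nat) (js : List Nat) (res : List Int) :
    Option (List Int) × List Int :=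
  match js with
  | [] => (none, res)
  | j :: rest =>
    if a.getD j 0 - a.getD i 0 = t then (some [(i : Int), (j : Int)], res)
    else if a.getD j 0 - a.getD i 0 = -t then pvAInner a t i rest [(j : Int), (i : Int)]
    else pvAInner a t i rest res

-- outer loop 'for i in range(len(array) - 1)'
def pvAOuter (a : List Int) (t : Int) (is_ : List Nat) (res : List Int) : List Int :=
  match is_ with
  | [] => res
  | i :: rest =>
    match pvAInner a t i (List.range' (i + 1) (a.length - (i + 1))) res with
    | (some r, _) => r
    | (none, res') => pvAOuter a t rest res'

def twoDiff (array : List Int) (target : Int) : List Int :=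
  -- array[len(array)-1] and array[0]: IndexError on [] (excluded by Pre_)
  match PySem.List.pyGet? array ((array.length : Int) - 1), PySem.List.pyGet? array 0 with
  | some x, some y =>
    if |x - y| < |target| then []
    else pvAOuter array target (List.range (array.length - 1)) []
  | _, _ => []   -- unreachable under Pre_

-- ===== PORT B =====
-- 'for p in range(n): last[array[p]] = p'
def altBuildLast (a : List Int) : PySem.Dict Int Int :=
  (List.range a.length).foldl (fun d p => d.insert (a.getD p 0) (p : Int)) PySem.Dict.empty

-- 'j = i + 1; while array[j] != v: j += 1'  (the caller guarantees a hit before the end)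
def altScanFor (a : List Int) (v : Int) (j : Nat) : Nat :=
  if j < a.length then (if a.getD j 0 = v then j else altScanFor a v (j + 1)) else j
termination_by a.length - j

-- 'for i in range(n - 1): ...'
def altPhase1 (a : List Int) (t : Int) (lastD : PySem.Dict Int Int) (is_ : List Nat) :
    Option (List Int) :=
  match is_ with
  | [] => none
  | i :: rest =>
    if lastD.getD (a.getD i 0 + t) (-1) > (i : Int) then
      some [(i : Int), (altScanFor a (a.getD i 0 + t) (i + 1) : Int)]
    else altPhase1 a t lastD rest

-- 'for i in range(n - 2, -1, -1): ...'  (iterates the reversed list [n-2, …, 0])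
def altPhase2 (a : List Int) (t : Int) (lastD : PySem.Dict Int Int) (is_ : List Nat) :
    Option (List Int) :=
  match is_ with
  | [] => none
  | i :: rest =>
    let j := lastD.getD (a.getD i 0 - t) (-1)
    if j > (i : Int) then some [j, (i : Int)]
    else altPhase2 a t lastD rest

def twoDiff_alt (array : List Int) (target : Int) : List Int :=
  match PySem.List.pyGet? array ((array.length : Int) - 1) with
  | none => []   -- unreachable under Pre_
  | some x =>
    match PySem.List.pyGet? array 0 with
    | none => []   -- unreachable under Pre_
    | some y =>
    if |x - y| < |target| then []
    else
      let lastD := altBuildLast array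
      match altPhase1 array target lastD (List.range (array.length - 1)) with
      | some r => r
      | none =>
        match altPhase2 array target lastD ((List.range (array.length - 1)).reverse) with
        | some r => r
        | none => []

-- ===== PRECONDITION & SPEC =====
-- A raises IndexError (array[-1]) on the empty list; B raises there too.
def Pre_twoDiff (array : List Int) (target : Int) : Prop := array ≠ []
instance (array : List Int) (target : Int) : Decidable (Pre_twoDiff array target) := by
  unfold Pre_twoDiff; infer_instance
def pvWitness_twoDiff : List Int × Int := ([1, 3], 2)

def Spec_twoDiff (array : List Int) (target : Int) (out : List Int) : Prop := out = twoDiff_alt array target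
instance (array : List Int) (target : Int) (out : List Int) : Decidable (Spec_twoDiff array target out) := by unfold Spec_twoDiff; infer_instance

-- ===== CLAIM (what is proved, stated in full; the proofs are below) =====
def Claim_equal_twoDiff : Prop := ∀ (array : List Int) (target : Int), Dom_twoDiff array target → Pre_twoDiff array target → Spec_twoDiff array target (twoDiff array target)

-- ===== LEMMAS AND PROOFS =====

-- The common specification both ports are reduced to: the lexicographically first
-- pair with difference t, else the lexicographically last pair with difference -t.
def pvPairsOf (a : List Int) (i : Nat) : List (Nat × Nat) :=
  (List.range' (i + 1) (a.length - (i + 1))).map (fun j => (i, j))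

def pvPairs (a : List Int) : List (Nat × Nat) :=
  (List.range (a.length - 1)).flatMap (pvPairsOf a)

def pvHit (a : List Int) (t : Int) (p : Nat × Nat) : Bool :=
  a.getD p.2 0 - a.getD p.1 0 == t

-- one flat loop over a pair list with A's accumulator: the meeting point
def scanA (a : List Int) (t : Int) (P : List (Nat × Nat)) (res : List Int) : List Int :=
  match P with
  | [] => res
  | (i, j) :: rest =>
    if a.getD j 0 - a.getD i 0 = t then [(i : Int), (j : Int)]
    else if a.getD j 0 - a.getD i 0 = -t then scanA a t rest [(j : Int), (i : Int)]
    else scanA a t rest res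

theorem scanA_char (a : List Int) (t : Int) (P : List (Nat × Nat)) (res : List Int) :
    scanA a t P res =
      match (P.filter (pvHit a t)).head? with
      | some (i, j) => [(i : Int), (j : Int)]
      | none =>
        match (P.filter (pvHit a (-t))).getLast? with
        | some (i, j) => [(j : Int), (i : Int)]
        | none => res := by
  induction P generalizing res with
  | nil => simp [scanA]
  | cons p rest ih =>
    obtain ⟨i, j⟩ := p
    by_cases h1 : a.getD j 0 - a.getD i 0 = t
    · have e1 : (a.getD j 0 - a.getD i 0 == t) = true := by rw [h1]; simp
      simp only [scanA, if_pos h1, List.filter_cons, pvHit, e1, if_true]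
      simp
    · by_cases h2 : a.getD j 0 - a.getD i 0 = -t
      · have hne : ¬ (a.getD j 0 - a.getD i 0 = t) := h1
        simp only [scanA, if_neg hne, if_pos h2, ih]
        simp only [List.filter_cons, pvHit]
        have e1 : (a.getD j 0 - a.getD i 0 == t) = false := by simp only [beq_eq_false_iff_ne]; exact h1
        have e2 : (a.getD j 0 - a.getD i 0 == -t) = true := by rw [h2]; simp
        simp only [e1, e2, if_false, if_true, Bool.false_eq_true]
        cases hh : (rest.filter (pvHit a t)).head? with
        | some p => obtain ⟨i', j'⟩ := p; simp
        | none =>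
          simp only []
          rw [List.getLast?_cons]
          cases hl : (rest.filter (pvHit a (-t))).getLast? with
          | some p => obtain ⟨i', j'⟩ := p; simp
          | none =>
            have : rest.filter (pvHit a (-t)) = [] := by
              cases hf : rest.filter (pvHit a (-t)) with
              | nil => rfl
              | cons x xs => rw [hf] at hl; simp at hl
            simp
      · simp only [scanA, if_neg h1, if_neg h2, ih]
        simp only [List.filter_cons, pvHit]
        have e1 : (a.getD j 0 - a.getD i 0 == t) = false := by simp only [beq_eq_false_iff_ne]; exact h1
        have e2 : (a.getD j 0 - a.getD i 0 == -t) = false := by simp only [beq_eq_false_iff_ne]; exact h2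
        simp only [e1, e2, Bool.false_eq_true, if_false]

theorem inner_eq_scanA (a : List Int) (t : Int) (i : Nat) (js : List Nat)
    (P : List (Nat × Nat)) (res : List Int) :
    scanA a t (js.map (fun j => (i, j)) ++ P) res =
      (match pvAInner a t i js res with
       | (some r, _) => r
       | (none, res') => scanA a t P res') := by
  induction js generalizing res with
  | nil => simp [pvAInner]
  | cons j rest ih =>
    by_cases h1 : a.getD j 0 - a.getD i 0 = t
    · simp only [List.map_cons, List.cons_append, scanA, pvAInner, if_pos h1]
    · by_cases h2 : a.getD j 0 - a.getD i 0 = -t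
      · simp only [pvAInner, if_neg h1, if_pos h2, List.map_cons, List.cons_append, scanA]
        exact ih _
      · simp only [pvAInner, if_neg h1, if_neg h2, List.map_cons, List.cons_append, scanA]
        exact ih _

theorem outer_eq_scanA (a : List Int) (t : Int) (is_ : List Nat) (res : List Int) :
    pvAOuter a t is_ res = scanA a t (is_.flatMap (pvPairsOf a)) res := by
  induction is_ generalizing res with
  | nil => simp [pvAOuter, scanA]
  | cons i rest ih =>
    simp only [List.flatMap_cons, pvPairsOf]
    rw [inner_eq_scanA]
    simp only [pvAOuter]
    cases h : pvAInner a t i (List.range' (i + 1) (a.length - (i + 1))) res with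
    | mk fst snd =>
      cases fst with
      | some r => simp
      | none => simp [ih]

-- last occurrence of v among indices < m, as A's dict default -1
def pvLastOcc (a : List Int) (m : Nat) (v : Int) : Int :=
  match m with
  | 0 => -1
  | m + 1 => if a.getD m 0 = v then (m : Int) else pvLastOcc a m v

theorem buildLast_getD_aux (a : List Int) (v : Int) (m : Nat) :
    (((List.range m).foldl (fun d p => d.insert (a.getD p 0) (p : Int))
        PySem.Dict.empty) : PySem.Dict Int Int).getD v (-1) = pvLastOcc a m v := by
  induction m with
  | zero => simp [pvLastOcc, PySem.Dict.getD, PySem.Dict.get?, PySem.Dict.empty]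
  | succ m ih =>
    rw [List.range_succ, List.foldl_append, List.foldl_cons, List.foldl_nil,
      PySem.Dict.getD_insert, ih]
    simp only [pvLastOcc]
    rcases eq_or_ne v (a.getD m 0) with h | h
    · rw [if_pos h, if_pos h.symm]
    · rw [if_neg h, if_neg (Ne.symm h)]

theorem buildLast_getD (a : List Int) (v : Int) :
    (altBuildLast a).getD v (-1) = pvLastOcc a a.length v :=
  buildLast_getD_aux a v a.length

theorem pvLastOcc_lt (a : List Int) (m : Nat) (v : Int) : pvLastOcc a m v < (m : Int) := by
  induction m with
  | zero => norm_num [pvLastOcc]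
  | succ m ih =>
    simp only [pvLastOcc]
    split_ifs
    · omega
    · omega

theorem pvLastOcc_ge_iff (a : List Int) (m : Nat) (v : Int) (s : Nat) :
    (s : Int) ≤ pvLastOcc a m v ↔ ∃ j, s ≤ j ∧ j < m ∧ a.getD j 0 = v := by
  induction m with
  | zero =>
    simp only [pvLastOcc]
    constructor
    · intro h; exfalso; omega
    · rintro ⟨j, -, hj, -⟩; omega
  | succ m ih =>
    simp only [pvLastOcc]
    by_cases h : a.getD m 0 = v
    · rw [if_pos h]
      constructor
      · intro hs
        exact ⟨m, by exact_mod_cast hs, Nat.lt_succ_self m, h⟩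
      · rintro ⟨j, hs, hj, -⟩
        have : j ≤ m := Nat.lt_succ_iff.mp hj
        omega
    · rw [if_neg h, ih]
      constructor
      · rintro ⟨j, hs, hj, hv⟩
        exact ⟨j, hs, Nat.lt_succ_of_lt hj, hv⟩
      · rintro ⟨j, hs, hj, hv⟩
        rcases Nat.lt_succ_iff_lt_or_eq.mp hj with hj' | rfl
        · exact ⟨j, hs, hj', hv⟩
        · exact absurd hv h

-- filtered suffix of indices, as appearing inside pvPairs
def pvIdxFilter (a : List Int) (v : Int) (s : Nat) : List Nat :=
  (List.range' s (a.length - s)).filter (fun j => a.getD j 0 == v)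

theorem pvIdxFilter_head (a : List Int) (v : Int) (s : Nat)
    (h : ∃ j, s ≤ j ∧ j < a.length ∧ a.getD j 0 = v) :
    (pvIdxFilter a v s).head? = some (altScanFor a v s) := by
  obtain ⟨c, hc⟩ : ∃ c, a.length - s = c := ⟨_, rfl⟩
  induction c generalizing s with
  | zero =>
    exfalso; obtain ⟨j, h1, h2, -⟩ := h; omega
  | succ c ih =>
    have hs : s < a.length := by omega
    rw [pvIdxFilter, hc, List.range'_succ, List.filter_cons, altScanFor, if_pos hs]
    by_cases hv : a.getD s 0 = v
    · have : (a.getD s 0 == v) = true := by rw [hv]; simp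
      rw [this, if_pos hv]
      simp
    · have hb : (a.getD s 0 == v) = false := by simp only [beq_eq_false_iff_ne]; exact hv
      rw [hb, if_neg hv]
      simp only [Bool.false_eq_true, if_false]
      have hc' : a.length - (s + 1) = c := by omega
      have h' : ∃ j, s + 1 ≤ j ∧ j < a.length ∧ a.getD j 0 = v := by
        obtain ⟨j, h1, h2, h3⟩ := h
        refine ⟨j, ?_, h2, h3⟩
        rcases Nat.eq_or_lt_of_le h1 with rfl | h1'
        · exact absurd h3 hv
        · omega
      have := ih (s + 1) h' hc'
      rw [pvIdxFilter, hc'] at this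
      exact this

theorem pvIdxFilter_nil (a : List Int) (v : Int) (s : Nat)
    (h : ¬ ∃ j, s ≤ j ∧ j < a.length ∧ a.getD j 0 = v) :
    pvIdxFilter a v s = [] := by
  rw [pvIdxFilter, List.filter_eq_nil_iff]
  intro j hj
  have hm := List.mem_range'_1.mp hj
  intro hv
  simp only [beq_iff_eq] at hv
  exact h ⟨j, hm.1, by omega, by simpa using hv⟩

theorem filter_range'_getLast (a : List Int) (v : Int) (c s : Nat) :
    ((List.range' s c).filter (fun j => a.getD j 0 == v)).getLast? =
      if (s : Int) ≤ pvLastOcc a (s + c) v then some ((pvLastOcc a (s + c) v).toNat)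
      else none := by
  induction c with
  | zero =>
    have := pvLastOcc_lt a s v
    rw [Nat.add_zero, if_neg (by omega)]
    simp
  | succ c ih =>
    rw [List.range'_1_concat, List.filter_append, List.getLast?_append]
    have hsc : s + (c + 1) = (s + c) + 1 := rfl
    rw [hsc]
    simp only [pvLastOcc]
    by_cases h : a.getD (s + c) 0 = v
    · have hb : (a.getD (s + c) 0 == v) = true := by rw [h]; simp
      rw [if_pos h]
      simp only [List.filter_cons, hb, if_true, List.filter_nil]
      rw [if_pos (by push_cast; omega : (s : Int) ≤ ((s + c : Nat) : Int))]
      simp only [List.getLast?_singleton, Option.some_or, Option.some.injEq]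
      omega
    · have hb : (a.getD (s + c) 0 == v) = false := by
        simp only [beq_eq_false_iff_ne]; exact h
      rw [if_neg h]
      simp only [List.filter_cons, hb, Bool.false_eq_true, if_false, List.filter_nil,
        List.getLast?_nil, Option.none_or]
      exact ih

theorem pvIdxFilter_getLast (a : List Int) (v : Int) (s : Nat)
    (h : (s : Int) ≤ pvLastOcc a a.length v) :
    (pvIdxFilter a v s).getLast? = some ((pvLastOcc a a.length v).toNat) := by
  have hs : s ≤ a.length := by
    obtain ⟨j, h1, h2, -⟩ := (pvLastOcc_ge_iff a a.length v s).mp h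
    omega
  rw [pvIdxFilter, filter_range'_getLast]
  rw [if_pos (by rw [Nat.add_sub_cancel' hs]; exact h)]
  rw [Nat.add_sub_cancel' hs]

theorem phase1_char (a : List Int) (t : Int) (is_ : List Nat) :
    altPhase1 a t (altBuildLast a) is_ =
      match ((is_.flatMap (pvPairsOf a)).filter (pvHit a t)).head? with
      | some (i, j) => some [(i : Int), (j : Int)]
      | none => none := by
  have hpred : ∀ x y : Int, (x - y == t) = (x == y + t) := by
    intro x y
    rcases eq_or_ne (x - y) t with h | h
    · have h2 : x = y + t := by omega
      rw [h, h2, beq_self_eq_true, beq_self_eq_true]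
    · have h2 : x ≠ y + t := by intro hh; exact h (by omega)
      rw [beq_eq_false_iff_ne.mpr h, beq_eq_false_iff_ne.mpr h2]
  induction is_ with
  | nil => simp [altPhase1]
  | cons i rest ih =>
    simp only [altPhase1, List.flatMap_cons, List.filter_append, List.head?_append]
    rw [buildLast_getD]
    have hfil : (pvPairsOf a i).filter (pvHit a t)
        = (pvIdxFilter a (a.getD i 0 + t) (i + 1)).map (fun j => (i, j)) := by
      rw [pvPairsOf, pvIdxFilter, List.filter_map]
      congr 1
      apply List.filter_congr
      intro j hj
      show (pvHit a t (i, j)) = (a.getD j 0 == a.getD i 0 + t)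
      simp only [pvHit]
      exact hpred _ _
    rw [hfil]
    by_cases hc : (i : Int) < pvLastOcc a a.length (a.getD i 0 + t)
    · rw [if_pos hc]
      have hc' : (((i + 1 : Nat)) : Int) ≤ pvLastOcc a a.length (a.getD i 0 + t) := by
        push_cast; omega
      have hex := (pvLastOcc_ge_iff a a.length (a.getD i 0 + t) (i + 1)).mp hc'
      rw [List.head?_map, pvIdxFilter_head a (a.getD i 0 + t) (i + 1) hex]
      rfl
    · rw [if_neg hc]
      have hnex : ¬ ∃ j, i + 1 ≤ j ∧ j < a.length ∧ a.getD j 0 = a.getD i 0 + t := by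
        intro hex
        exact hc (by
          have := (pvLastOcc_ge_iff a a.length (a.getD i 0 + t) (i + 1)).mpr hex
          push_cast at this; omega)
      rw [pvIdxFilter_nil a (a.getD i 0 + t) (i + 1) hnex]
      simp only [List.map_nil, List.head?_nil, Option.none_or]
      exact ih

theorem phase2_char (a : List Int) (t : Int) (is_ : List Nat) :
    altPhase2 a t (altBuildLast a) is_ =
      match ((is_.reverse.flatMap (pvPairsOf a)).filter (pvHit a (-t))).getLast? with
      | some (i, j) => some [(j : Int), (i : Int)]
      | none => none := by
  have hpred : ∀ x y : Int, (x - y == -t) = (x == y - t) := by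
    intro x y
    rcases eq_or_ne (x - y) (-t) with h | h
    · have h2 : x = y - t := by omega
      rw [h, h2, beq_self_eq_true, beq_self_eq_true]
    · have h2 : x ≠ y - t := by intro hh; exact h (by omega)
      rw [beq_eq_false_iff_ne.mpr h, beq_eq_false_iff_ne.mpr h2]
  induction is_ with
  | nil => simp [altPhase2]
  | cons i rest ih =>
    simp only [altPhase2, List.reverse_cons, List.flatMap_append, List.flatMap_cons,
      List.flatMap_nil, List.append_nil, List.filter_append, List.getLast?_append]
    rw [buildLast_getD]
    have hfil : (pvPairsOf a i).filter (pvHit a (-t))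
        = (pvIdxFilter a (a.getD i 0 - t) (i + 1)).map (fun j => (i, j)) := by
      rw [pvPairsOf, pvIdxFilter, List.filter_map]
      congr 1
      apply List.filter_congr
      intro j hj
      show (pvHit a (-t) (i, j)) = (a.getD j 0 == a.getD i 0 - t)
      simp only [pvHit]
      exact hpred _ _
    rw [hfil]
    by_cases hc : (i : Int) < pvLastOcc a a.length (a.getD i 0 - t)
    · rw [if_pos hc]
      have hc' : (((i + 1 : Nat)) : Int) ≤ pvLastOcc a a.length (a.getD i 0 - t) := by
        push_cast; omega
      rw [List.getLast?_map, pvIdxFilter_getLast a (a.getD i 0 - t) (i + 1) hc']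
      simp only [Option.map_some, Option.some_or]
      have : ((pvLastOcc a a.length (a.getD i 0 - t)).toNat : Int)
          = pvLastOcc a a.length (a.getD i 0 - t) := by omega
      rw [this]
    · rw [if_neg hc]
      have hnex : ¬ ∃ j, i + 1 ≤ j ∧ j < a.length ∧ a.getD j 0 = a.getD i 0 - t := by
        intro hex
        exact hc (by
          have := (pvLastOcc_ge_iff a a.length (a.getD i 0 - t) (i + 1)).mpr hex
          push_cast at this; omega)
      rw [pvIdxFilter_nil a (a.getD i 0 - t) (i + 1) hnex]
      simp only [List.map_nil, List.getLast?_nil, Option.none_or]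
      exact ih

-- ===== VERDICT (by name: the statement is the Claim_ definition above) =====
theorem twoDiff_spec : Claim_equal_twoDiff := by
  unfold Claim_equal_twoDiff
  intro array target _ hpre
  unfold Spec_twoDiff
  have hlen : 0 < array.length := List.length_pos_iff.mpr hpre
  have hcast : ((array.length : Int) - 1) = ((array.length - 1 : Nat) : Int) := by omega
  have e1 : PySem.List.pyGet? array ((array.length : Int) - 1)
      = some (array.getD (array.length - 1) 0) := by
    rw [hcast, PySem.List.pyGet?_natCast,
      List.getElem?_eq_getElem (show array.length - 1 < array.length by omega)]
    simp [List.getD, List.getElem?_eq_getElem (show array.length - 1 < array.length by omega)]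
  have e0 : PySem.List.pyGet? array (0 : Int)
      = some (array.getD 0 0) := by
    rw [show ((0 : Int)) = ((0 : Nat) : Int) by rfl, PySem.List.pyGet?_natCast,
      List.getElem?_eq_getElem hlen]
    simp [List.getD, List.getElem?_eq_getElem hlen]
  rw [twoDiff, twoDiff_alt, e1, e0]
  dsimp only
  split_ifs with hguard
  · rfl
  · rw [outer_eq_scanA, scanA_char, phase1_char, phase2_char, List.reverse_reverse]
    cases hh : ((((List.range (array.length - 1)).flatMap (pvPairsOf array)).filter
        (pvHit array target)).head?) with
    | some p => obtain ⟨i, j⟩ := p; rfl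
    | none =>
      cases hl : ((((List.range (array.length - 1)).flatMap (pvPairsOf array)).filter
          (pvHit array (-target))).getLast?) with
      | some p => obtain ⟨i, j⟩ := p; rfl
      | none => rfl
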